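-- pv_equiv track=rewrite | github.com/electronsandstuff/Advent-of-Code-2021 | day_22/puzzles.py | cube_subtract
-- ===== SOURCE A (Python) =====
-- def cubes_intersect(a, b):
--     """
--     Find if two cubes intersect w/ each other
--     :param a: cube a, tuple of min, max tuple of coords
--     :param b: cube a, tuple of min, max tuple of coords
--     :return: bool, if cubes intersect
--     """
--     for i, j, k, l in zip(a[0], a[1], b[0], b[1]):
--         if i >= l or k >= j:
--             return False
--     return True
--
-- def get_cube_intersection(a, b):
--     """
--     Find the intersection of two cubes.  Note: method returns invalid cube if input cubes do not actually intersect
--     :param a: cube a, tuple of min, max tuple of coords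
--     :param b: cube a, tuple of min, max tuple of coords
--     :return: intersecting volume, tuple of min, max tuple of coords
--     """
--     return tuple(zip(*[(max(i, k), min(j, l)) for i, j, k, l in zip(a[0], a[1], b[0], b[1])]))
--
-- def split_cube_axis(c, idx, pos):
--     """
--     Splits a cube along a single axis and returns the results as a set.  Runs even if there is not intersection.
--     :param c: The cube as tuple of tuple ((min coords), (max coords))
--     :param idx: int, The axis to split along
--     :param pos: list[int] The positions to split.  The split occurs between cubes pos-1 and pos
--     :return: set of cubes (tuples of tuples)
--     """
--     s = set()
--     start = c[0][idx]
--     for p in sorted(pos):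
--         if c[0][idx] < p < c[1][idx]:
--             s.add((c[0][:idx] + (start,) + c[0][idx + 1:], c[1][:idx] + (p, ) + c[1][idx+1:]))
--             start = p
--     s.add((c[0][:idx] + (start,) + c[0][idx + 1:], c[1]))
--     return s
--
-- def contains(a, b):
--     """
--     Test if cube a is contained in cube b
--     :param a: cube a, tuple of tuple ((min coords), (max coords))
--     :param b: cube b, tuple of tuple ((min coords), (max coords))
--     :return: bool, if a in b
--     """
--     for i, j, k, l in zip(a[0], a[1], b[0], b[1]):
--         if i < k or j > l:
--             return False
--     return True
--
-- def cube_subtract(a, b):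
--     """
--     Compute the set of cubes a - b
--     :param a: cube a, tuple of tuple ((min coords), (max coords))
--     :param b: cube a, tuple of tuple ((min coords), (max coords))
--     :return: difference, set of tuples of tuples ((min coords), (max coords))
--     """
--     if contains(a, b):
--         return set()
--     if not cubes_intersect(a, b):
--         return {a, }
--     c = get_cube_intersection(a, b)
--     splitting_cube = a
--     out_set = set()
--     for idx, i in enumerate(zip(*c)):
--         s = split_cube_axis(splitting_cube, idx, i)
--         for j in s:
--             if cubes_intersect(j, c):
--                 splitting_cube = j
--                 break
--         s.remove(splitting_cube)
--         out_set.update(s)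
--         if splitting_cube == c:
--             break
--     return out_set
-- ===== SOURCE B (Python) =====
-- def cube_subtract(a, b):
--     quads = list(zip(a[0], a[1], b[0], b[1]))
--     if all(k <= i and j <= l for (i, j, k, l) in quads):
--         return set()
--     lo = [max(i, k) for (i, j, k, l) in quads]
--     hi = [min(j, l) for (i, j, k, l) in quads]
--     if any(h <= l for (l, h) in zip(lo, hi)):
--         return {a}
--     out = set()
--     for k, (l, h) in enumerate(zip(lo, hi)):
--         if a[0][k] < l:
--             out.add((tuple(lo[:k]) + (a[0][k],) + tuple(a[0][k + 1:]),
--                      tuple(hi[:k]) + (l,) + tuple(a[1][k + 1:])))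
--         if h < a[1][k]:
--             out.add((tuple(lo[:k]) + (h,) + tuple(a[0][k + 1:]),
--                      tuple(hi[:k]) + (a[1][k],) + tuple(a[1][k + 1:])))
--     return out
-- ===== Notes on version B (the rewrite author's own statement) =====
-- stated objective: simpler
-- what changed: B replaces A's stateful axis-walking loop (split each axis with split_cube_axis, search the pieces for the one intersecting the clamped intersection, remove it, collect the rest, break when it equals the intersection) by directly constructing the at-most-two boundary slabs per axis from the clamped per-axis bounds (lo, hi), emitting each slab only when strictly non-empty.
import Mathlib
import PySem

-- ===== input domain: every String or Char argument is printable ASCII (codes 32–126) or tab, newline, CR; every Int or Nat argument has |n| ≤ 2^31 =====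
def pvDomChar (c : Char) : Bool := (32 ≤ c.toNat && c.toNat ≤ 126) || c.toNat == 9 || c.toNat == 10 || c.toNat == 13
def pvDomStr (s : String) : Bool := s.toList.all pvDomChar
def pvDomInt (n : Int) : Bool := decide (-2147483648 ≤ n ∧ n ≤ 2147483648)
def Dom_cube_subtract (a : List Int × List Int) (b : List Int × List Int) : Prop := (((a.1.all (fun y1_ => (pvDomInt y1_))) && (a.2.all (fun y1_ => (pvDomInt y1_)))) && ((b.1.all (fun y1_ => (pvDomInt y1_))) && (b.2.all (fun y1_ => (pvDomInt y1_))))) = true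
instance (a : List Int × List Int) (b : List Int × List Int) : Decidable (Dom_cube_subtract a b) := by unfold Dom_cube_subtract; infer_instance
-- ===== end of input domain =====

-- B replaces A's axis-walking split/search/remove loop by directly emitting the (at most two)
-- boundary slabs per axis from the clamped intersection (objective: simpler).

-- ===== PORT A =====
-- zip(a[0], a[1], b[0], b[1]), grouped as ((i, j), (k, l)); both Pythons zip the same four lists
def pvZip4 (a : List Int × List Int) (b : List Int × List Int) : List ((Int × Int) × (Int × Int)) :=
  (a.1.zip a.2).zip (b.1.zip b.2)

def containsLoop : List ((Int × Int) × (Int × Int)) → Bool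
  | [] => true
  | ((i, j), (k, l)) :: rest => if i < k || j > l then false else containsLoop rest

def intersectLoop : List ((Int × Int) × (Int × Int)) → Bool
  | [] => true
  | ((i, j), (k, l)) :: rest => if i ≥ l || k ≥ j then false else intersectLoop rest

def interCube (a : List Int × List Int) (b : List Int × List Int) : List Int × List Int :=
  let ps := (pvZip4 a b).map (fun x => (max x.1.1 x.2.1, min x.1.2 x.2.2))
  (ps.map Prod.fst, ps.map Prod.snd)

def splitCubeAxis (c : List Int × List Int) (idx : Nat) (pos : List Int) :
    List (List Int × List Int) :=
  let st := (PySem.List.sorted pos (fun x => x) false).foldl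
    (fun (st : List (List Int × List Int) × Int) p =>
      if c.1.getD idx 0 < p ∧ p < c.2.getD idx 0 then
        (PySem.Set.add st.1 (c.1.take idx ++ st.2 :: c.1.drop (idx + 1),
                             c.2.take idx ++ p :: c.2.drop (idx + 1)), p)
      else st)
    (PySem.Set.empty, c.1.getD idx 0)
  PySem.Set.add st.1 (c.1.take idx ++ st.2 :: c.1.drop (idx + 1), c.2)

def subLoop (c : List Int × List Int) (idx : Nat) :
    List (Int × Int) → List Int × List Int → List (List Int × List Int) →
    List (List Int × List Int)
  | [], _, out => out
  | (cm, cM) :: rest, sc, out =>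
    let s := splitCubeAxis sc idx [cm, cM]
    let sc2 := (s.find? (fun j => intersectLoop (pvZip4 j c))).getD sc
    match PySem.Set.remove? s sc2 with
    | none => out
    | some s' =>
      let out' := PySem.Set.update out s'
      if sc2 = c then out' else subLoop c (idx + 1) rest sc2 out'

def cube_subtract (a : List Int × List Int) (b : List Int × List Int) :
    List (List Int × List Int) :=
  if containsLoop (pvZip4 a b) then []
  else if !intersectLoop (pvZip4 a b) then [a]
  else
    let c := interCube a b
    subLoop c 0 (c.1.zip c.2) a PySem.Set.empty

-- ===== PORT B =====
def altLoop (a : List Int × List Int) (lo hi : List Int) (k : Nat) :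
    List (Int × Int) → List (List Int × List Int) → List (List Int × List Int)
  | [], out => out
  | (l, h) :: rest, out =>
    let out1 := if a.1.getD k 0 < l then
        PySem.Set.add out (lo.take k ++ a.1.getD k 0 :: a.1.drop (k + 1),
                           hi.take k ++ l :: a.2.drop (k + 1))
      else out
    let out2 := if h < a.2.getD k 0 then
        PySem.Set.add out1 (lo.take k ++ h :: a.1.drop (k + 1),
                            hi.take k ++ a.2.getD k 0 :: a.2.drop (k + 1))
      else out1
    altLoop a lo hi (k + 1) rest out2

def cube_subtract_alt (a : List Int × List Int) (b : List Int × List Int) :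
    List (List Int × List Int) :=
  let quads := pvZip4 a b
  if quads.all (fun x => decide (x.2.1 ≤ x.1.1) && decide (x.1.2 ≤ x.2.2)) then []
  else
    let lo := quads.map (fun x => max x.1.1 x.2.1)
    let hi := quads.map (fun x => min x.1.2 x.2.2)
    if (lo.zip hi).any (fun p => decide (p.2 ≤ p.1)) then [a]
    else altLoop a lo hi 0 (lo.zip hi) PySem.Set.empty

-- ===== PRECONDITION & SPEC =====
-- Pre_ excludes exactly the inputs on which the Python A raises (KeyError at s.remove: no piece of
-- the axis split intersects the clamped intersection): a not contained in b, the strict per-axis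
-- intersection test succeeds, yet the clamped intersection is degenerate (empty) on some axis
-- because a or b has an empty extent there.
def Pre_cube_subtract (a : List Int × List Int) (b : List Int × List Int) : Prop :=
  (∀ x ∈ pvZip4 a b, x.2.1 ≤ x.1.1 ∧ x.1.2 ≤ x.2.2)
  ∨ (∃ x ∈ pvZip4 a b, x.2.2 ≤ x.1.1 ∨ x.1.2 ≤ x.2.1)
  ∨ (∀ x ∈ pvZip4 a b, max x.1.1 x.2.1 < min x.1.2 x.2.2)
instance (a : List Int × List Int) (b : List Int × List Int) :
    Decidable (Pre_cube_subtract a b) := by unfold Pre_cube_subtract; infer_instance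

def pvWitness_cube_subtract : (List Int × List Int) × (List Int × List Int) :=
  (([0, 0], [10, 10]), ([2, 2], [5, 5]))

def Spec_cube_subtract (a : List Int × List Int) (b : List Int × List Int)
    (out : List (List Int × List Int)) : Prop := out = cube_subtract_alt a b
instance (a : List Int × List Int) (b : List Int × List Int)
    (out : List (List Int × List Int)) : Decidable (Spec_cube_subtract a b out) := by
  unfold Spec_cube_subtract; infer_instance

-- ===== CLAIM (what is proved, stated in full; the proofs are below) =====
def Claim_equal_cube_subtract : Prop := ∀ (a : List Int × List Int) (b : List Int × List Int), Dom_cube_subtract a b → Pre_cube_subtract a b → Spec_cube_subtract a b (cube_subtract a b)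

-- ===== LEMMAS AND PROOFS =====
theorem intersectLoop_eq_all (xs : List ((Int × Int) × (Int × Int))) :
    intersectLoop xs = xs.all (fun x => decide (x.1.1 < x.2.2) && decide (x.2.1 < x.1.2)) := by
  induction xs with
  | nil => rfl
  | cons x rest ih =>
    obtain ⟨⟨i, j⟩, k, l⟩ := x
    simp only [intersectLoop, List.all_cons, ih]
    by_cases h1 : l ≤ i <;> by_cases h2 : j ≤ k <;> simp [h1, h2] <;> omega

-- mixed prefix/suffix list: getD

theorem pv_getD_mix (lo xs : List Int) (k m : Nat) (hk : k ≤ lo.length) (hx : k ≤ xs.length) :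
    (lo.take k ++ xs.drop k).getD m 0 = if m < k then lo.getD m 0 else xs.getD m 0 := by
  have hlt : (lo.take k).length = k := by simp [hk]
  by_cases hm : m < k
  · rw [List.getD_eq_getElem?_getD, List.getElem?_append_left (by omega),
      List.getElem?_take_of_lt hm, ← List.getD_eq_getElem?_getD, if_pos hm]
  · rw [List.getD_eq_getElem?_getD, List.getElem?_append_right (by omega), hlt,
      List.getElem?_drop, if_neg hm, ← List.getD_eq_getElem?_getD]
    congr 1
    omega

theorem pv_len_mix (lo xs : List Int) (k : Nat) (hk : k ≤ lo.length) (hx : k ≤ xs.length) :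
    (lo.take k ++ xs.drop k).length = xs.length := by
  simp
  omega

theorem pv_take_mix (lo xs : List Int) (k : Nat) (hk : k ≤ lo.length) :
    (lo.take k ++ xs.drop k).take k = lo.take k :=
  List.take_left' (by simp [hk])

theorem pv_drop_mix (lo xs : List Int) (k : Nat) (hk : k ≤ lo.length) :
    (lo.take k ++ xs.drop k).drop (k + 1) = xs.drop (k + 1) := by
  have h1 : (lo.take k ++ xs.drop k).drop (k+1) = ((lo.take k ++ xs.drop k).drop k).drop 1 := by
    rw [List.drop_drop]
  rw [h1, List.drop_left' (by simp [hk]), List.drop_drop]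

theorem pv_mix_succ (lo xs : List Int) (k : Nat) (hk : k < lo.length) (hx : k < xs.length) :
    lo.take (k + 1) ++ xs.drop (k + 1) = lo.take k ++ lo.getD k 0 :: xs.drop (k + 1) := by
  rw [List.take_succ, List.getD_eq_getElem?_getD]
  cases h : lo[k]? with
  | none => simp [List.getElem?_eq_none_iff] at h; omega
  | some v => simp [h]

theorem pv_drop_cons (xs : List Int) (k : Nat) (hk : k < xs.length) :
    xs.drop k = xs.getD k 0 :: xs.drop (k + 1) := by
  rw [List.drop_eq_getElem_cons hk, List.getD_eq_getElem?_getD, List.getElem?_eq_getElem hk]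
  rfl

def pvSc (a : List Int × List Int) (lo hi : List Int) (k : Nat) : List Int × List Int :=
  (lo.take k ++ a.1.drop k, hi.take k ++ a.2.drop k)

def pvLow (a : List Int × List Int) (lo hi : List Int) (k : Nat) : List Int × List Int :=
  (lo.take k ++ a.1.getD k 0 :: a.1.drop (k + 1), hi.take k ++ lo.getD k 0 :: a.2.drop (k + 1))

def pvMid (a : List Int × List Int) (lo hi : List Int) (k : Nat) : List Int × List Int :=
  (lo.take k ++ lo.getD k 0 :: a.1.drop (k + 1), hi.take k ++ hi.getD k 0 :: a.2.drop (k + 1))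

def pvHigh (a : List Int × List Int) (lo hi : List Int) (k : Nat) : List Int × List Int :=
  (lo.take k ++ hi.getD k 0 :: a.1.drop (k + 1), hi.take k ++ a.2.getD k 0 :: a.2.drop (k + 1))

theorem pv_split_step (a : List Int × List Int) (lo hi : List Int) (k : Nat)
    (hlen : lo.length = hi.length) (ha1 : lo.length ≤ a.1.length) (ha2 : lo.length ≤ a.2.length)
    (hk : k < lo.length)
    (h1 : a.1.getD k 0 ≤ lo.getD k 0) (h2 : lo.getD k 0 < hi.getD k 0)
    (h3 : hi.getD k 0 ≤ a.2.getD k 0) :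
    splitCubeAxis (pvSc a lo hi k) k [lo.getD k 0, hi.getD k 0]
      = (if a.1.getD k 0 < lo.getD k 0 then [pvLow a lo hi k] else [])
        ++ pvMid a lo hi k
        :: (if hi.getD k 0 < a.2.getD k 0 then [pvHigh a lo hi k] else []) := by
  have hs : PySem.List.sorted [lo.getD k 0, hi.getD k 0] (fun x => x) false
      = [lo.getD k 0, hi.getD k 0] := by
    apply PySem.List.sorted_eq_self_of_pairwise
    refine List.Pairwise.cons ?_ (List.pairwise_singleton _ _)
    intro y hy
    simp only [List.mem_singleton] at hy
    omega
  have g1 : (pvSc a lo hi k).1.getD k 0 = a.1.getD k 0 := by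
    rw [pvSc, pv_getD_mix lo a.1 k k (by omega) (by omega)]
    simp
  have g2 : (pvSc a lo hi k).2.getD k 0 = a.2.getD k 0 := by
    rw [pvSc, pv_getD_mix hi a.2 k k (by omega) (by omega)]
    simp
  have t1 : (pvSc a lo hi k).1.take k = lo.take k := pv_take_mix lo a.1 k (by omega)
  have t2 : (pvSc a lo hi k).2.take k = hi.take k := pv_take_mix hi a.2 k (by omega)
  have d1 : (pvSc a lo hi k).1.drop (k + 1) = a.1.drop (k + 1) := pv_drop_mix lo a.1 k (by omega)
  have d2 : (pvSc a lo hi k).2.drop (k + 1) = a.2.drop (k + 1) := pv_drop_mix hi a.2 k (by omega)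
  have s2 : (pvSc a lo hi k).2 = hi.take k ++ a.2.getD k 0 :: a.2.drop (k + 1) := by
    conv_lhs => rw [pvSc]
    rw [pv_drop_cons a.2 k (by omega)]
  have h1' : a.1[k]?.getD 0 ≤ lo[k]?.getD 0 := by simpa [List.getD_eq_getElem?_getD] using h1
  have h2' : lo[k]?.getD 0 < hi[k]?.getD 0 := by simpa [List.getD_eq_getElem?_getD] using h2
  have h3' : hi[k]?.getD 0 ≤ a.2[k]?.getD 0 := by simpa [List.getD_eq_getElem?_getD] using h3
  rw [splitCubeAxis, hs]
  simp only [List.foldl_cons, List.foldl_nil, g1, g2, t1, t2, d1, d2]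
  rw [s2]
  simp only [pvLow, pvMid, pvHigh, List.getD_eq_getElem?_getD]
  split_ifs <;>
    simp [PySem.Set.add_eq_ite, PySem.Set.empty] <;>
    first
      | omega
      | (split_ifs <;> first | omega | (simp_all; omega) | simp_all)

theorem pv_zip_drop (lo hi : List Int) (k : Nat) (l h : Int) (rest : List (Int × Int))
    (hlen : lo.length = hi.length)
    (hr : (lo.zip hi).drop k = (l, h) :: rest) :
    k < lo.length ∧ l = lo.getD k 0 ∧ h = hi.getD k 0 ∧ rest = (lo.zip hi).drop (k + 1) := by
  have hk : k < (lo.zip hi).length := by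
    by_contra hx
    rw [List.drop_eq_nil_of_le (by omega)] at hr
    cases hr
  rw [List.drop_eq_getElem_cons hk] at hr
  have hk' : k < lo.length := by
    rw [List.length_zip] at hk
    omega
  have hk'' : k < hi.length := by omega
  have he : (lo.zip hi)[k] = (lo[k], hi[k]) := List.getElem_zip ..
  rw [he] at hr
  obtain ⟨h1, h2⟩ := List.cons.injEq .. ▸ hr
  obtain ⟨ha, hb⟩ := Prod.mk.injEq .. ▸ h1
  refine ⟨hk', ?_, ?_, h2.symm ▸ rfl⟩
  · rw [← ha, List.getD_eq_getElem?_getD, List.getElem?_eq_getElem hk']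
    rfl
  · rw [← hb, List.getD_eq_getElem?_getD, List.getElem?_eq_getElem hk'']
    rfl

theorem pv_getD_insert (pre : List Int) (v : Int) (t : List Int) (k : Nat)
    (hp : pre.length = k) : (pre ++ v :: t).getD k 0 = v := by
  rw [List.getD_eq_getElem?_getD, List.getElem?_append_right (by omega), hp]
  simp

theorem pv_getElem_eq_getD (xs : List Int) (i : Nat) (h : i < xs.length) :
    xs[i]'h = xs.getD i 0 := by
  rw [List.getD_eq_getElem?_getD, List.getElem?_eq_getElem h]
  rfl

theorem pv_inter_sc (a : List Int × List Int) (lo hi : List Int) (j : Nat)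
    (hlen : lo.length = hi.length) (ha1 : lo.length ≤ a.1.length) (ha2 : lo.length ≤ a.2.length)
    (hj : j ≤ lo.length)
    (hb : ∀ m, m < lo.length → a.1.getD m 0 ≤ lo.getD m 0 ∧ lo.getD m 0 < hi.getD m 0 ∧
      hi.getD m 0 ≤ a.2.getD m 0) :
    intersectLoop (pvZip4 (pvSc a lo hi j) (lo, hi)) = true := by
  rw [intersectLoop_eq_all, List.all_eq_true]
  intro x hx
  rw [List.mem_iff_getElem] at hx
  obtain ⟨i, hi', hx⟩ := hx
  simp only [pvZip4] at hi' hx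
  have l1 : (pvSc a lo hi j).1.length = a.1.length := pv_len_mix lo a.1 j hj (by omega)
  have l2 : (pvSc a lo hi j).2.length = a.2.length := pv_len_mix hi a.2 j (by omega) (by omega)
  have hil : i < lo.length := by
    simp [List.length_zip, l1, l2] at hi'
    omega
  have hx1 : i < ((pvSc a lo hi j).1.zip (pvSc a lo hi j).2).length := by
    simp [List.length_zip, l1, l2]
    omega
  have hx2 : i < (lo.zip hi).length := by
    simp [List.length_zip]
    omega
  rw [List.getElem_zip] at hx
  have e1 : ((pvSc a lo hi j).1.zip (pvSc a lo hi j).2)[i]'hx1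
      = ((pvSc a lo hi j).1[i]'(by omega), (pvSc a lo hi j).2[i]'(by omega)) := List.getElem_zip ..
  have e2 : (lo.zip hi)[i]'hx2 = (lo[i]'(by omega), hi[i]'(by omega)) := List.getElem_zip ..
  rw [e1, e2] at hx
  subst hx
  have v1 : (pvSc a lo hi j).1[i]'(by omega) = if i < j then lo.getD i 0 else a.1.getD i 0 := by
    rw [pv_getElem_eq_getD _ i (by omega)]
    exact pv_getD_mix lo a.1 j i hj (by omega)
  have v2 : (pvSc a lo hi j).2[i]'(by omega) = if i < j then hi.getD i 0 else a.2.getD i 0 := by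
    rw [pv_getElem_eq_getD _ i (by omega)]
    exact pv_getD_mix hi a.2 j i (by omega) (by omega)
  have v3 : lo[i]'(by omega) = lo.getD i 0 := pv_getElem_eq_getD _ i (by omega)
  have v4 : hi[i]'(by omega) = hi.getD i 0 := pv_getElem_eq_getD _ i (by omega)
  simp only [v1, v2, v3, v4]
  have hbb := hb i hil
  simp only [List.getD_eq_getElem?_getD] at hbb
  by_cases hij : i < j <;> simp [hij] <;> omega

theorem pv_len_ins (pre xs : List Int) (v : Int) (k : Nat) (hp : pre.length = k)
    (hx : k < xs.length) : (pre ++ v :: xs.drop (k + 1)).length = xs.length := by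
  simp [hp]
  omega

theorem pv_inter_low (a : List Int × List Int) (lo hi : List Int) (k : Nat)
    (hlen : lo.length = hi.length) (ha1 : lo.length ≤ a.1.length) (ha2 : lo.length ≤ a.2.length)
    (hk : k < lo.length) :
    intersectLoop (pvZip4 (pvLow a lo hi k) (lo, hi)) = false := by
  rw [intersectLoop_eq_all]
  have lt : (lo.take k).length = k := by simp; omega
  have lt2 : (hi.take k).length = k := by simp; omega
  have l1 : (pvLow a lo hi k).1.length = a.1.length := pv_len_ins _ _ _ _ lt (by omega)
  have l2 : (pvLow a lo hi k).2.length = a.2.length := pv_len_ins _ _ _ _ lt2 (by omega)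
  have hkz : k < ((((pvLow a lo hi k).1.zip (pvLow a lo hi k).2)).zip (lo.zip hi)).length := by
    simp [List.length_zip, l1, l2]
    omega
  rw [List.all_eq_false]
  refine ⟨(((pvLow a lo hi k).1.zip (pvLow a lo hi k).2).zip (lo.zip hi))[k]'(by exact hkz), List.getElem_mem _, ?_⟩
  rw [List.getElem_zip, List.getElem_zip, List.getElem_zip]
  have e1 : (pvLow a lo hi k).1[k]'(by omega) = a.1.getD k 0 := by
    rw [pv_getElem_eq_getD _ k (by omega)]
    exact pv_getD_insert _ _ _ _ lt
  have e2 : (pvLow a lo hi k).2[k]'(by omega) = lo.getD k 0 := by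
    rw [pv_getElem_eq_getD _ k (by omega)]
    exact pv_getD_insert _ _ _ _ lt2
  have e3 : lo[k]'(by omega) = lo.getD k 0 := pv_getElem_eq_getD _ k (by omega)
  simp only [e1, e2, e3]
  simp

theorem altLoop_noop (a : List Int × List Int) (lo hi : List Int)
    (hlen : lo.length = hi.length) :
    ∀ (rest : List (Int × Int)) (k : Nat) (out : List (List Int × List Int)),
    rest = (lo.zip hi).drop k →
    (∀ m, k ≤ m → m < lo.length → lo.getD m 0 ≤ a.1.getD m 0 ∧ a.2.getD m 0 ≤ hi.getD m 0) →
    altLoop a lo hi k rest out = out := by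
  intro rest
  induction rest with
  | nil => intro k out _ _; rfl
  | cons p rest' ih =>
    intro k out hr hq
    obtain ⟨l, h⟩ := p
    obtain ⟨hk, hl, hh, hrest⟩ := pv_zip_drop lo hi k l h rest' hlen hr.symm
    have hb := hq k (le_refl k) hk
    rw [altLoop, if_neg (by omega), if_neg (by omega)]
    exact ih (k + 1) out hrest (fun m h1 h2 => hq m (by omega) h2)

theorem pv_loop_eq (a : List Int × List Int) (lo hi : List Int)
    (hlen : lo.length = hi.length) (ha1 : lo.length ≤ a.1.length) (ha2 : lo.length ≤ a.2.length)
    (hb : ∀ m, m < lo.length → a.1.getD m 0 ≤ lo.getD m 0 ∧ lo.getD m 0 < hi.getD m 0 ∧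
      hi.getD m 0 ≤ a.2.getD m 0) :
    ∀ (rest : List (Int × Int)) (k : Nat) (out : List (List Int × List Int)),
    rest = (lo.zip hi).drop k →
    subLoop (lo, hi) k rest (pvSc a lo hi k) out = altLoop a lo hi k rest out := by
  intro rest
  induction rest with
  | nil => intros; rfl
  | cons p rest' ih =>
    intro k out hr
    obtain ⟨l, h⟩ := p
    obtain ⟨hk, hl, hh, hrest⟩ := pv_zip_drop lo hi k l h rest' hlen hr.symm
    subst hl
    subst hh
    have hbk := hb k hk
    have hsplit := pv_split_step a lo hi k hlen ha1 ha2 hk hbk.1 hbk.2.1 hbk.2.2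
    have hmid : pvSc a lo hi (k + 1) = pvMid a lo hi k := by
      rw [pvSc, pvMid, pv_mix_succ lo a.1 k hk (by omega), pv_mix_succ hi a.2 k (by omega) (by omega)]
    have hpredmid : intersectLoop (pvZip4 (pvMid a lo hi k) (lo, hi)) = true := by
      rw [← hmid]
      exact pv_inter_sc a lo hi (k + 1) hlen ha1 ha2 (by omega) hb
    have hnlm : pvLow a lo hi k ≠ pvMid a lo hi k := by
      intro hx
      have hsnd := congrArg Prod.snd hx
      rw [pvLow, pvMid] at hsnd
      simp at hsnd
      simp only [List.getD_eq_getElem?_getD] at hbk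
      omega
    have hnhm : pvHigh a lo hi k ≠ pvMid a lo hi k := by
      intro hx
      have hfst := congrArg Prod.fst hx
      rw [pvHigh, pvMid] at hfst
      simp at hfst
      simp only [List.getD_eq_getElem?_getD] at hbk
      omega
    -- the break-case side condition
    have hnoop : pvMid a lo hi k = (lo, hi) →
        ∀ m, k + 1 ≤ m → m < lo.length →
          lo.getD m 0 ≤ a.1.getD m 0 ∧ a.2.getD m 0 ≤ hi.getD m 0 := by
      intro hbrk m hm1 hm2
      rw [← hmid, pvSc] at hbrk
      have c1 := congrArg Prod.fst hbrk
      have c2 := congrArg Prod.snd hbrk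
      simp only [] at c1 c2
      have e1 : lo.getD m 0 = a.1.getD m 0 := by
        conv_lhs => rw [← c1]
        rw [pv_getD_mix lo a.1 (k + 1) m (by omega) (by omega), if_neg (by omega)]
      have e2 : hi.getD m 0 = a.2.getD m 0 := by
        conv_lhs => rw [← c2]
        rw [pv_getD_mix hi a.2 (k + 1) m (by omega) (by omega), if_neg (by omega)]
      omega
    have hfpos : (fun j => intersectLoop (pvZip4 j (lo, hi))) (pvMid a lo hi k) = true :=
      hpredmid
    have hfneg : ¬ (fun j => intersectLoop (pvZip4 j (lo, hi))) (pvLow a lo hi k) = true := by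
      simp only []
      rw [pv_inter_low a lo hi k hlen ha1 ha2 hk]
      simp
    simp only [subLoop]
    rw [hsplit]
    by_cases hP : a.1.getD k 0 < lo.getD k 0
    · rw [if_pos hP]
      simp only [List.cons_append, List.nil_append]
      rw [List.find?_cons_of_neg (p := fun j => intersectLoop (pvZip4 j (lo, hi))) hfneg,
        List.find?_cons_of_pos (p := fun j => intersectLoop (pvZip4 j (lo, hi))) hfpos]
      simp only [Option.getD_some]
      by_cases hQ : hi.getD k 0 < a.2.getD k 0
      · rw [if_pos hQ]
        have hrem : PySem.Set.remove?
            [pvLow a lo hi k, pvMid a lo hi k, pvHigh a lo hi k] (pvMid a lo hi k)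
            = some [pvLow a lo hi k, pvHigh a lo hi k] := by
          simp [PySem.Set.remove?, PySem.Set.discard, List.filter_cons, beq_iff_eq, hnlm, hnhm]
        simp only [hrem]
        rw [PySem.Set.update_cons, PySem.Set.update_cons, PySem.Set.update_nil]
        by_cases hbrk : pvMid a lo hi k = (lo, hi)
        · rw [if_pos hbrk]
          rw [altLoop, if_pos hP, if_pos hQ]
          rw [altLoop_noop a lo hi hlen rest' (k + 1) _ hrest (hnoop hbrk)]
          rfl
        · rw [if_neg hbrk]
          rw [altLoop, if_pos hP, if_pos hQ]
          rw [← ih (k + 1) _ hrest, hmid]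
          rfl
      · rw [if_neg hQ]
        have hrem : PySem.Set.remove?
            [pvLow a lo hi k, pvMid a lo hi k] (pvMid a lo hi k)
            = some [pvLow a lo hi k] := by
          simp [PySem.Set.remove?, PySem.Set.discard, List.filter_cons, beq_iff_eq, hnlm]
        simp only [hrem]
        rw [PySem.Set.update_cons, PySem.Set.update_nil]
        by_cases hbrk : pvMid a lo hi k = (lo, hi)
        · rw [if_pos hbrk]
          rw [altLoop, if_pos hP, if_neg hQ]
          rw [altLoop_noop a lo hi hlen rest' (k + 1) _ hrest (hnoop hbrk)]
          rfl
        · rw [if_neg hbrk]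
          rw [altLoop, if_pos hP, if_neg hQ]
          rw [← ih (k + 1) _ hrest, hmid]
          rfl
    · rw [if_neg hP]
      simp only [List.nil_append]
      rw [List.find?_cons_of_pos (p := fun j => intersectLoop (pvZip4 j (lo, hi))) hfpos]
      simp only [Option.getD_some]
      by_cases hQ : hi.getD k 0 < a.2.getD k 0
      · rw [if_pos hQ]
        have hrem : PySem.Set.remove?
            [pvMid a lo hi k, pvHigh a lo hi k] (pvMid a lo hi k)
            = some [pvHigh a lo hi k] := by
          simp [PySem.Set.remove?, PySem.Set.discard, List.filter_cons, beq_iff_eq, hnhm]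
        simp only [hrem]
        rw [PySem.Set.update_cons, PySem.Set.update_nil]
        by_cases hbrk : pvMid a lo hi k = (lo, hi)
        · rw [if_pos hbrk]
          rw [altLoop, if_neg hP, if_pos hQ]
          rw [altLoop_noop a lo hi hlen rest' (k + 1) _ hrest (hnoop hbrk)]
          rfl
        · rw [if_neg hbrk]
          rw [altLoop, if_neg hP, if_pos hQ]
          rw [← ih (k + 1) _ hrest, hmid]
          rfl
      · rw [if_neg hQ]
        have hrem : PySem.Set.remove? [pvMid a lo hi k] (pvMid a lo hi k) = some [] := by
          simp [PySem.Set.remove?, PySem.Set.discard]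
        simp only [hrem]
        rw [PySem.Set.update_nil]
        by_cases hbrk : pvMid a lo hi k = (lo, hi)
        · rw [if_pos hbrk]
          rw [altLoop, if_neg hP, if_neg hQ]
          rw [altLoop_noop a lo hi hlen rest' (k + 1) _ hrest (hnoop hbrk)]
        · rw [if_neg hbrk]
          rw [altLoop, if_neg hP, if_neg hQ]
          rw [← ih (k + 1) _ hrest, hmid]

theorem containsLoop_eq_all (xs : List ((Int × Int) × (Int × Int))) :
    containsLoop xs = xs.all (fun x => decide (x.2.1 ≤ x.1.1) && decide (x.1.2 ≤ x.2.2)) := by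
  induction xs with
  | nil => rfl
  | cons x rest ih =>
    obtain ⟨⟨i, j⟩, k, l⟩ := x
    simp only [containsLoop, List.all_cons, ih]
    by_cases h1 : i < k <;> by_cases h2 : l < j <;> simp [h1, h2] <;> omega

theorem pv_q_elem (a b : List Int × List Int) (m : Nat) (hm : m < (pvZip4 a b).length) :
    (pvZip4 a b)[m]'hm
      = ((a.1.getD m 0, a.2.getD m 0), (b.1.getD m 0, b.2.getD m 0)) := by
  have hm' := hm
  simp only [pvZip4, List.length_zip, lt_min_iff] at hm'
  simp only [pvZip4]
  rw [List.getElem_zip, List.getElem_zip, List.getElem_zip]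
  rw [pv_getElem_eq_getD _ m (by omega), pv_getElem_eq_getD _ m (by omega),
    pv_getElem_eq_getD _ m (by omega), pv_getElem_eq_getD _ m (by omega)]

theorem pv_getD_map_max (a b : List Int × List Int) (m : Nat) (hm : m < (pvZip4 a b).length) :
    ((pvZip4 a b).map (fun x => max x.1.1 x.2.1)).getD m 0
      = max (a.1.getD m 0) (b.1.getD m 0) := by
  rw [← pv_getElem_eq_getD _ m (by simpa using hm), List.getElem_map, pv_q_elem a b m hm]

theorem pv_getD_map_min (a b : List Int × List Int) (m : Nat) (hm : m < (pvZip4 a b).length) :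
    ((pvZip4 a b).map (fun x => min x.1.2 x.2.2)).getD m 0
      = min (a.2.getD m 0) (b.2.getD m 0) := by
  rw [← pv_getElem_eq_getD _ m (by simpa using hm), List.getElem_map, pv_q_elem a b m hm]

theorem pv_main_spec (a b : List Int × List Int) (hpre : Pre_cube_subtract a b) :
    cube_subtract a b = cube_subtract_alt a b := by
  simp only [cube_subtract, cube_subtract_alt, ← containsLoop_eq_all]
  by_cases hcont : containsLoop (pvZip4 a b) = true
  · rw [if_pos hcont, if_pos hcont]
  · rw [if_neg hcont, if_neg hcont]
    set q := pvZip4 a b with hq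
    set lo := q.map (fun x => max x.1.1 x.2.1) with hlo
    set hi := q.map (fun x => min x.1.2 x.2.2) with hhi
    have hlolen : lo.length = q.length := by simp [hlo]
    have hhilen : hi.length = q.length := by simp [hhi]
    have hqlen : q.length = min (min a.1.length a.2.length) (min b.1.length b.2.length) := by
      simp [hq, pvZip4]
    have hc : interCube a b = (lo, hi) := by
      rw [interCube]
      simp only [List.map_map]
      rfl
    by_cases hint : intersectLoop q = true
    · -- proper intersection: both run their loops
      have hnd : ∀ x ∈ q, max x.1.1 x.2.1 < min x.1.2 x.2.2 := by
        rcases hpre with hco | hni | hnd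
        · exfalso
          apply hcont
          rw [containsLoop_eq_all, List.all_eq_true]
          intro x hx
          have := hco x hx
          simp
          omega
        · exfalso
          obtain ⟨x, hx, hxx⟩ := hni
          rw [intersectLoop_eq_all] at hint
          rw [List.all_eq_true] at hint
          have := hint x hx
          simp at this
          omega
        · exact hnd
      have hb : ∀ m, m < lo.length → a.1.getD m 0 ≤ lo.getD m 0 ∧
          lo.getD m 0 < hi.getD m 0 ∧ hi.getD m 0 ≤ a.2.getD m 0 := by
        intro m hm
        have hmq : m < q.length := by omega
        have h1 : lo.getD m 0 = max (a.1.getD m 0) (b.1.getD m 0) := pv_getD_map_max a b m hmq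
        have h2 : hi.getD m 0 = min (a.2.getD m 0) (b.2.getD m 0) := pv_getD_map_min a b m hmq
        have h3 := hnd (q[m]'hmq) (List.getElem_mem hmq)
        rw [pv_q_elem a b m hmq] at h3
        simp only [h1, h2]
        constructor
        · exact le_max_left _ _
        constructor
        · simpa using h3
        · exact min_le_left _ _
      have hany : (lo.zip hi).any (fun p => decide (p.2 ≤ p.1)) = false := by
        rw [List.any_eq_false]
        intro p hp
        rw [List.mem_iff_getElem] at hp
        obtain ⟨i, hi', hp⟩ := hp
        have hiq : i < lo.length := by
          rw [List.length_zip] at hi'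
          omega
        rw [List.getElem_zip] at hp
        have := hb i hiq
        subst hp
        simp
        rw [pv_getElem_eq_getD lo i (by omega), pv_getElem_eq_getD hi i (by omega)]
        simp only [List.getD_eq_getElem?_getD] at this ⊢
        omega
      rw [if_neg (show ¬(!intersectLoop q) = true by rw [hint]; simp),
        if_neg (by rw [hany]; simp), hc]
      exact pv_loop_eq a lo hi (by omega) (by omega) (by omega) hb (lo.zip hi) 0
        PySem.Set.empty (by rw [List.drop_zero])
    · -- no intersection: both return {a}
      have hB : (lo.zip hi).any (fun p => decide (p.2 ≤ p.1)) = true := by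
        rw [intersectLoop_eq_all, Bool.not_eq_true, List.all_eq_false] at hint
        obtain ⟨x, hx, hxx⟩ := hint
        rw [List.mem_iff_getElem] at hx
        obtain ⟨i, hiq, hx⟩ := hx
        rw [pv_q_elem a b i hiq] at hx
        rw [List.any_eq_true]
        have hizip : i < (lo.zip hi).length := by
          rw [List.length_zip]
          omega
        refine ⟨(lo.zip hi)[i]'hizip, List.getElem_mem hizip, ?_⟩
        rw [List.getElem_zip]
        simp only [decide_eq_true_eq]
        rw [pv_getElem_eq_getD lo i (by omega), pv_getElem_eq_getD hi i (by omega)]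
        rw [pv_getD_map_max a b i hiq, pv_getD_map_min a b i hiq]
        subst hx
        simp at hxx
        simp only [List.getD_eq_getElem?_getD]
        omega
      rw [Bool.not_eq_true] at hint
      have hA : (!intersectLoop q) = true := by rw [hint]; rfl
      rw [if_pos hA, if_pos hB]
-- ===== VERDICT (by name: the statement is the Claim_ definition above) =====
theorem cube_subtract_spec : Claim_equal_cube_subtract := by
  intro a b _ hpre
  exact pv_main_spec a b hpre
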